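-- pv_equiv track=rewrite | github.com/SkirOwen/advent_of_code | 2025/day_06/day_06.py | parse
-- ===== SOURCE A (Python) =====
-- def parse(lines: list[str], vertical: bool = False) -> tuple[list[list[int]], list[str]]:
--
-- 	size = len(lines)
-- 	numbers = []
-- 	operand = lines[-1].split()
--
-- 	if not vertical:
-- 		for i, line in enumerate(lines[:-1]):
-- 			temp_line = line.split()
-- 			numbers.append(list(map(int, temp_line)))
--
-- 		numbers_T = [
-- 			[
-- 				numbers[i][j] for i in range(len(numbers))
-- 			] for j in range(len(numbers[0]))
-- 		]
--
-- 	else: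
-- 		vertical_nbr = [[] for i in range(len(lines[0]))]
--
-- 		for i, line in enumerate(lines[:-1]):
-- 			for j, char in reversed(list(enumerate(line))):
-- 				if char == " ":
-- 					pass
-- 				else:
-- 					vertical_nbr[j].append(int(char))
--
-- 		parsed_vertical = []
-- 		column = []
--
-- 		for v_n in vertical_nbr:
--
-- 			if len(v_n) == 0:
-- 				parsed_vertical.append(column)
-- 				column = []
-- 			else:
-- 				nbr = 0
-- 				for i, char in enumerate(v_n):
-- 					nbr += char * 10 ** (len(v_n) - i - 1)
--
-- 				column.append(nbr)
-- 		parsed_vertical.append(column)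
--
-- 		numbers_T = parsed_vertical
--
-- 	return numbers_T, operand
-- ===== SOURCE B (Python) =====
-- def split_cols(cells):
-- 	if not cells:
-- 		return [[]]
-- 	(v, p), rest = cells[0], split_cols(cells[1:])
-- 	if p == 1:
-- 		return [[]] + rest
-- 	return [[v] + rest[0]] + rest[1:]
--
--
-- def parse(lines: list[str], vertical: bool = False) -> tuple[list[list[int]], list[str]]:
-- 	operand = lines[-1].split()
-- 	body = lines[:-1]
--
-- 	if not vertical:
-- 		rows = [[int(t) for t in line.split()] for line in body]
-- 		return [list(col) for col in zip(*rows)], operand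
--
-- 	cells = [(0, 1)] * len(lines[0])
-- 	for line in reversed(body):
-- 		for j, ch in enumerate(line):
-- 			if ch != " ":
-- 				v, p = cells[j]
-- 				cells[j] = (v + int(ch) * p, p * 10)
-- 	return split_cols(cells), operand
-- ===== Notes on version B (the rewrite author's own statement) =====
-- stated objective: alternative
-- what changed: The vertical branch is replaced by a single bottom-up pass that keeps one (value, place-multiplier) pair per column and accumulates value += digit*place, place *= 10 as it meets digits (no per-column digit lists and no power-of-10 table), followed by a recursive head-wise splitter that groups columns at place==1; the flat branch transposes with zip(*rows) instead of the double-indexed comprehension.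
import Mathlib
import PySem

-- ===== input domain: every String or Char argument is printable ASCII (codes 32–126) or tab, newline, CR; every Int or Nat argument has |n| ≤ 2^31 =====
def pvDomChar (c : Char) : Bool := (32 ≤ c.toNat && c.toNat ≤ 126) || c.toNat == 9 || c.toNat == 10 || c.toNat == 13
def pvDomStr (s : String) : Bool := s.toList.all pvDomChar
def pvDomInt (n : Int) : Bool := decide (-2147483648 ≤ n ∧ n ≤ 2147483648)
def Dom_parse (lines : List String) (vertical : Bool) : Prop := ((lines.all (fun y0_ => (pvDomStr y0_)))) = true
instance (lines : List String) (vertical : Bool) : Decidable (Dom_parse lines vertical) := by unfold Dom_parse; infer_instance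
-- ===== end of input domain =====

-- B replaces the vertical branch's digit-list transpose + powers-of-10 + stateful grouping
-- by one bottom-up pass over per-column (value, place) pairs and a recursive head-wise
-- splitter, and the flat transpose by a zip; objective: alternative (same cost, different shape).
-- Return value only; neither implementation mutates its arguments.

-- ===== PORT A =====
-- int(c) for a single character, total under Pre_ (Python raises ValueError where ofChars? is none)
def pvCharInt (c : Char) : Int := (PySem.Int.ofChars? [c]).getD 0

def parse (lines : List String) (vertical : Bool) : List (List Int) × List String :=
  let operand := PySem.Str.split₀ ((PySem.List.pyGet? lines (-1)).getD "")
  if !vertical then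
    let numbers := (PySem.List.slice lines none (some (-1))).foldl
      (fun acc line => acc ++ [(PySem.Str.split₀ line).map (fun t => (PySem.Int.ofStr? t).getD 0)]) []
    let numbersT := (PySem.List.pyRange 0 ((numbers.headD []).length : Int) 1).map (fun j =>
      (PySem.List.pyRange 0 (numbers.length : Int) 1).map (fun i =>
        PySem.List.pyGetD (PySem.List.pyGetD numbers i []) j 0))
    (numbersT, operand)
  else
    let verticalNbr0 : List (List Int) :=
      (List.range (lines.headD "").toList.length).map (fun _ => [])
    let verticalNbr := (PySem.List.slice lines none (some (-1))).foldl
      (fun cols line =>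
        ((PySem.List.enumerate line.toList).reverse).foldl
          (fun cols jc =>
            if jc.2 == ' ' then cols
            else PySem.List.pySetD cols jc.1 ((PySem.List.pyGetD cols jc.1 []) ++ [pvCharInt jc.2]))
          cols)
      verticalNbr0
    let st := verticalNbr.foldl
      (fun (st : List (List Int) × List Int) vn =>
        if vn.length == 0 then (st.1 ++ [st.2], [])
        else
          let nbr := (PySem.List.enumerate vn).foldl
            (fun acc ic => acc + ic.2 * (10:Int) ^ (vn.length - 1 - ic.1.toNat)) 0
          (st.1, st.2 ++ [nbr]))
      (([] : List (List Int)), ([] : List Int))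
    (st.1 ++ [st.2], operand)

-- ===== PORT B =====
-- zip(*rows): truncates at the shortest row; fuel = length of the first row is enough
-- because zip stops as soon as some row is exhausted.
def pyZipAux : Nat → List (List Int) → List (List Int)
  | 0, _ => []
  | n+1, rows =>
      if rows.any List.isEmpty then []
      else rows.map (fun r => r.headD 0) :: pyZipAux n (rows.map List.tail)

def pyZip (rows : List (List Int)) : List (List Int) :=
  if rows.isEmpty then [] else pyZipAux (rows.headD []).length rows

-- split_cols from Source B; rest[0]/rest[1:] never sees [] (split_cols always returns ≥ 1 group),
-- ported with headD/tail.
def splitCols : List (Int × Int) → List (List Int)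
  | [] => [[]]
  | (v, p) :: cells =>
      let rest := splitCols cells
      if p == 1 then [] :: rest
      else (v :: rest.headD []) :: rest.tail

def parse_alt (lines : List String) (vertical : Bool) : List (List Int) × List String :=
  let operand := PySem.Str.split₀ ((PySem.List.pyGet? lines (-1)).getD "")
  let body := lines.dropLast
  if !vertical then
    let rows := body.map (fun line => (PySem.Str.split₀ line).map (fun t => (PySem.Int.ofStr? t).getD 0))
    (pyZip rows, operand)
  else
    let cells0 : List (Int × Int) := List.replicate (lines.headD "").toList.length ((0:Int), (1:Int))
    let cells := body.reverse.foldl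
      (fun cells line =>
        (PySem.List.enumerate line.toList).foldl
          (fun cells jc =>
            if jc.2 == ' ' then cells
            else
              let vp := PySem.List.pyGetD cells jc.1 ((0:Int), (1:Int))
              PySem.List.pySetD cells jc.1 (vp.1 + pvCharInt jc.2 * vp.2, vp.2 * 10))
          cells)
      cells0
    (splitCols cells, operand)

-- ===== PRECONDITION & SPEC =====
-- Pre_parse holds exactly where Python A returns normally: lines nonempty; in the vertical
-- branch every non-space character of the body lines lies within len(lines[0]) (else
-- IndexError) and is int()-able (else ValueError); in the flat branch the body is nonempty,
-- every token is int()-able and no body row has fewer tokens than the first (else IndexError).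
def Pre_parse (lines : List String) (vertical : Bool) : Prop :=
  lines ≠ [] ∧
  (vertical = true →
    ∀ line ∈ lines.dropLast, ∀ jc ∈ PySem.List.enumerate line.toList,
      jc.2 = ' ' ∨ (jc.1 < ((lines.headD "").toList.length : Int) ∧ (PySem.Int.ofChars? [jc.2]).isSome = true)) ∧
  (vertical = false →
    lines.dropLast ≠ [] ∧
    (∀ line ∈ lines.dropLast, ∀ t ∈ PySem.Str.split₀ line, (PySem.Int.ofStr? t).isSome = true) ∧
    (∀ line ∈ lines.dropLast, (PySem.Str.split₀ (lines.headD "")).length ≤ (PySem.Str.split₀ line).length))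
instance (lines : List String) (vertical : Bool) : Decidable (Pre_parse lines vertical) := by
  unfold Pre_parse; infer_instance

def pvWitness_parse : List String × Bool := (["1 2", "30 4", "+ *"], false)

def Spec_parse (lines : List String) (vertical : Bool) (out : List (List Int) × List String) : Prop := out = parse_alt lines vertical
instance (lines : List String) (vertical : Bool) (out : List (List Int) × List String) : Decidable (Spec_parse lines vertical out) := by unfold Spec_parse; infer_instance

-- ===== CLAIM (what is proved, stated in full; the proofs are below) =====
def Claim_equal_parse : Prop := ∀ (lines : List String) (vertical : Bool), Dom_parse lines vertical → Pre_parse lines vertical → Spec_parse lines vertical (parse lines vertical)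

-- ===== LEMMAS AND PROOFS =====

-- the (at most one) digit line cs, enumerated from s, contributes to column j of a width-w grid
def contribAt (w : Nat) (cs : List Char) (s j : Nat) : List Int :=
  if s ≤ j ∧ j < w then
    (match cs[j - s]? with
     | some c => if c = ' ' then [] else [pvCharInt c]
     | none => [])
  else []

lemma contribAt_nil (w s j : Nat) : contribAt w [] s j = [] := by
  unfold contribAt; split <;> simp

lemma contribAt_cons_ne (w : Nat) (c : Char) (cs : List Char) (s j : Nat) (hj : j ≠ s) :
    contribAt w (c::cs) s j = contribAt w cs (s+1) j := by
  unfold contribAt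
  by_cases hsj : s ≤ j
  · have h1 : s + 1 ≤ j := by omega
    by_cases hw : j < w
    · rw [if_pos ⟨hsj, hw⟩, if_pos ⟨h1, hw⟩]
      have : j - s = (j - (s+1)) + 1 := by omega
      rw [this]; simp
    · rw [if_neg (by omega), if_neg (by omega)]
  · rw [if_neg (by omega), if_neg (by omega)]

lemma contribAt_self (w : Nat) (c : Char) (cs : List Char) (s : Nat) (hw : s < w) :
    contribAt w (c::cs) s s = if c = ' ' then [] else [pvCharInt c] := by
  unfold contribAt
  rw [if_pos ⟨le_refl s, hw⟩]; simp

lemma contribAt_oob (w : Nat) (cs : List Char) (s j : Nat) (hw : ¬ j < w) :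
    contribAt w cs s j = [] := by
  unfold contribAt; rw [if_neg (by omega)]

lemma contribAt_sub_singleton (w : Nat) (cs : List Char) (s j : Nat) :
    contribAt w cs s j = [] ∨ ∃ x, contribAt w cs s j = [x] := by
  unfold contribAt
  split
  · cases h : cs[j - s]? with
    | none => exact Or.inl rfl
    | some c => by_cases hc : c = ' ' <;> simp [hc]
  · exact Or.inl rfl

lemma getD_set_self' {l : List (List Int)} {i : Nat} {v : List Int} (h : i < l.length) :
    (l.set i v).getD i [] = v := by
  simp [List.getD, h]

lemma getD_set_ne' {l : List (List Int)} {i j : Nat} {v : List Int} (h : i ≠ j) :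
    (l.set i v).getD j [] = l.getD j [] := by
  simp [List.getD, List.getElem?_set_ne h]

-- ===== A-side characterisation: the scatter fold collects per-column digit lists =====

lemma lineFold_spec (cs : List Char) : ∀ (s : Nat) (cols : List (List Int)),
    (((PySem.List.enumerate cs (s:Int)).reverse).foldl
      (fun cols (jc : Int × Char) => if jc.2 == ' ' then cols
        else PySem.List.pySetD cols jc.1 ((PySem.List.pyGetD cols jc.1 []) ++ [pvCharInt jc.2])) cols).length = cols.length
  ∧ ∀ j : Nat, (((PySem.List.enumerate cs (s:Int)).reverse).foldl
      (fun cols (jc : Int × Char) => if jc.2 == ' ' then cols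
        else PySem.List.pySetD cols jc.1 ((PySem.List.pyGetD cols jc.1 []) ++ [pvCharInt jc.2])) cols).getD j []
      = cols.getD j [] ++ contribAt cols.length cs s j := by
  induction cs with
  | nil => intro s cols; simp [PySem.List.enumerate, contribAt_nil]
  | cons c cs ih =>
    intro s cols
    rw [List.foldl_reverse, PySem.List.enumerate_cons, List.foldr_cons]
    have hcast : (s:Int) + 1 = ((s+1 : Nat) : Int) := by push_cast; ring
    rw [hcast, ← List.foldl_reverse]
    obtain ⟨ihlen, ihget⟩ := ih (s+1) cols
    set R := ((PySem.List.enumerate cs ((s+1:Nat):Int)).reverse).foldl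
      (fun cols (jc : Int × Char) => if jc.2 == ' ' then cols
        else PySem.List.pySetD cols jc.1 ((PySem.List.pyGetD cols jc.1 []) ++ [pvCharInt jc.2])) cols with hR
    by_cases hc : c = ' '
    · subst hc
      simp only [show ((' ' == ' ') = true) from rfl]
      rw [if_pos trivial]
      refine ⟨ihlen, fun j => ?_⟩
      rw [ihget j]
      congr 1
      by_cases hj : j = s
      · subst hj
        by_cases hw : j < cols.length
        · rw [contribAt_self _ _ _ _ hw, if_pos rfl]
          unfold contribAt; rw [if_neg (by omega)]
        · rw [contribAt_oob _ _ _ _ hw, contribAt_oob _ _ _ _ hw]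
      · exact (contribAt_cons_ne _ _ _ _ _ hj).symm
    · have hbeq : (c == ' ') = false := by simp [hc]
      simp only [hbeq]
      rw [if_neg (by simp), PySem.List.pyGetD_natCast, PySem.List.pySetD_natCast]
      refine ⟨by rw [List.length_set]; exact ihlen, fun j => ?_⟩
      by_cases hj : j = s
      · subst hj
        by_cases hw : j < cols.length
        · rw [getD_set_self' (by rw [ihlen]; exact hw), ihget j,
              contribAt_self _ _ _ _ hw, if_neg hc]
          have : contribAt cols.length cs (j+1) j = [] := by
            unfold contribAt; rw [if_neg (by omega)]
          rw [this]; simp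
        · rw [List.set_eq_of_length_le (by rw [ihlen]; omega), ihget j,
              contribAt_oob _ _ _ _ hw, contribAt_oob _ _ _ _ hw]
      · rw [getD_set_ne' (Ne.symm hj), ihget j, contribAt_cons_ne _ _ _ _ _ hj]

def colDigits (w : Nat) (body : List String) (j : Nat) : List Int :=
  body.flatMap (fun line => contribAt w line.toList 0 j)

lemma bodyFold_spec (body : List String) : ∀ (cols : List (List Int)),
    ((body.foldl (fun cols line =>
        ((PySem.List.enumerate line.toList).reverse).foldl
          (fun cols (jc : Int × Char) => if jc.2 == ' ' then cols
            else PySem.List.pySetD cols jc.1 ((PySem.List.pyGetD cols jc.1 []) ++ [pvCharInt jc.2])) cols) cols).length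
      = cols.length)
  ∧ ∀ j : Nat, ((body.foldl (fun cols line =>
        ((PySem.List.enumerate line.toList).reverse).foldl
          (fun cols (jc : Int × Char) => if jc.2 == ' ' then cols
            else PySem.List.pySetD cols jc.1 ((PySem.List.pyGetD cols jc.1 []) ++ [pvCharInt jc.2])) cols) cols).getD j []
      = cols.getD j [] ++ colDigits cols.length body j) := by
  induction body with
  | nil => intro cols; simp [colDigits]
  | cons line body ih =>
    intro cols
    simp only [List.foldl_cons]
    have h0 : ((0:Nat):Int) = (0:Int) := rfl
    obtain ⟨hlen1, hget1⟩ := lineFold_spec line.toList 0 cols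
    rw [h0] at hlen1 hget1
    set C := ((PySem.List.enumerate line.toList).reverse).foldl
      (fun cols (jc : Int × Char) => if jc.2 == ' ' then cols
        else PySem.List.pySetD cols jc.1 ((PySem.List.pyGetD cols jc.1 []) ++ [pvCharInt jc.2])) cols with hC
    obtain ⟨ihlen, ihget⟩ := ih C
    refine ⟨by rw [ihlen, hlen1], fun j => ?_⟩
    rw [ihget j, hget1 j, hlen1]
    simp [colDigits]

lemma horner_shift (v : List Int) : ∀ a : Int,
    v.foldl (fun n d => n * 10 + d) a = a * 10 ^ v.length + v.foldl (fun n d => n * 10 + d) 0 := by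
  induction v with
  | nil => intro a; simp
  | cons d v ih =>
    intro a
    simp only [List.foldl_cons, List.length_cons]
    rw [ih (a*10+d), ih (0*10+d)]
    ring

lemma sum_pow_eq_horner (v : List Int) : ∀ (s m : Nat), m = s + v.length →
    ((PySem.List.enumerate v (s:Int)).map
        (fun ic : Int × Int => ic.2 * (10:Int) ^ (m - 1 - ic.1.toNat))).sum
      = v.foldl (fun n d => n * 10 + d) 0 := by
  induction v with
  | nil => intro s m _; simp [PySem.List.enumerate]
  | cons d v ih =>
    intro s m hm
    rw [PySem.List.enumerate_cons]
    have hcast : (s:Int) + 1 = ((s+1 : Nat) : Int) := by push_cast; ring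
    rw [hcast]
    simp only [List.map_cons, List.sum_cons]
    simp only [List.length_cons] at hm
    rw [ih (s+1) m (by omega)]
    have h1 : m - 1 - ((s:Int)).toNat = v.length := by
      simp only [Int.toNat_natCast]; omega
    rw [h1, List.foldl_cons, horner_shift v (0*10+d)]
    ring

lemma nbr_eq (vn : List Int) :
    (PySem.List.enumerate vn).foldl
        (fun acc (ic : Int × Int) => acc + ic.2 * (10:Int) ^ (vn.length - 1 - ic.1.toNat)) 0
      = vn.foldl (fun n d => n * 10 + d) 0 := by
  rw [PySem.List.foldl_add]
  have := sum_pow_eq_horner vn 0 vn.length (by omega)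
  simpa using this

def bDigits (body : List String) (j : Nat) : List Int :=
  body.filterMap (fun line =>
    match line.toList[j]? with
    | some c => if c = ' ' then none else some (pvCharInt c)
    | none => none)

lemma bDigits_cons (line : String) (b : List String) (j : Nat) :
    bDigits (line :: b) j = (match line.toList[j]? with
      | some c => if c = ' ' then none else some (pvCharInt c)
      | none => none).toList ++ bDigits b j := by
  rw [bDigits, bDigits, List.filterMap_eq_flatMap_toList, List.filterMap_eq_flatMap_toList,
      List.flatMap_cons]

lemma contribAt_zero (w : Nat) (cs : List Char) (j : Nat) (hj : j < w) :
    contribAt w cs 0 j = (match cs[j]? with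
      | some c => if c = ' ' then none else some (pvCharInt c)
      | none => none).toList := by
  unfold contribAt
  rw [if_pos ⟨Nat.zero_le j, hj⟩]
  simp only [Nat.sub_zero]
  cases h : cs[j]? with
  | none => rfl
  | some c => by_cases hc : c = ' ' <;> simp [hc]

lemma colDigits_eq_bDigits (body : List String) (w j : Nat) (hj : j < w) :
    colDigits w body j = bDigits body j := by
  induction body with
  | nil => simp [colDigits, bDigits]
  | cons line b ih =>
    rw [colDigits, List.flatMap_cons]
    rw [show (b.flatMap fun line => contribAt w line.toList 0 j) = colDigits w b j from rfl]
    rw [ih, contribAt_zero _ _ _ hj, bDigits_cons]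

lemma getElem_eq_getD (l : List (List Int)) (j : Nat) (h : j < l.length) :
    l[j] = l.getD j [] := by
  rw [List.getD, List.getElem?_eq_getElem h]
  rfl

lemma vcols_eq (lines : List String) :
    (lines.dropLast.foldl (fun cols line =>
        ((PySem.List.enumerate line.toList).reverse).foldl
          (fun cols (jc : Int × Char) => if jc.2 == ' ' then cols
            else PySem.List.pySetD cols jc.1 ((PySem.List.pyGetD cols jc.1 []) ++ [pvCharInt jc.2])) cols)
      ((List.range (lines.headD "").toList.length).map (fun _ => [])))
    = (List.range (lines.headD "").toList.length).map (fun j => bDigits lines.dropLast j) := by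
  obtain ⟨hlen, hget⟩ := bodyFold_spec lines.dropLast
      ((List.range (lines.headD "").toList.length).map (fun _ => []))
  have hc0 : ((List.range (lines.headD "").toList.length).map
      (fun _ => ([] : List Int))).length = (lines.headD "").toList.length := by simp
  apply List.ext_getElem (by rw [hlen]; simp)
  intro j h1 h2
  have hjw : j < (lines.headD "").toList.length := by simpa using h2
  rw [getElem_eq_getD _ _ h1, hget j,
      PySem.List.getD_map_range _ _ _ _ hjw, hc0,
      colDigits_eq_bDigits _ _ _ hjw, List.nil_append]
  simp only [List.getElem_map, List.getElem_range]

-- ===== B-side characterisation: the bottom-up (value, place) pass =====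

def bStep (vp : Int × Int) (d : Int) : Int × Int := (vp.1 + d * vp.2, vp.2 * 10)

lemma getDp_set_self {l : List (Int × Int)} {i : Nat} {v : Int × Int} (h : i < l.length) :
    (l.set i v).getD i ((0:Int),(1:Int)) = v := by
  simp [List.getD, h]

lemma getDp_set_ne {l : List (Int × Int)} {i j : Nat} {v : Int × Int} (h : i ≠ j) :
    (l.set i v).getD j ((0:Int),(1:Int)) = l.getD j ((0:Int),(1:Int)) := by
  simp [List.getD, List.getElem?_set_ne h]

lemma bLineFold_spec (cs : List Char) : ∀ (s : Nat) (cells : List (Int × Int)),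
    (((PySem.List.enumerate cs (s:Int))).foldl
      (fun cells (jc : Int × Char) => if jc.2 == ' ' then cells
        else
          let vp := PySem.List.pyGetD cells jc.1 ((0:Int), (1:Int))
          PySem.List.pySetD cells jc.1 (vp.1 + pvCharInt jc.2 * vp.2, vp.2 * 10)) cells).length = cells.length
  ∧ ∀ j : Nat, (((PySem.List.enumerate cs (s:Int))).foldl
      (fun cells (jc : Int × Char) => if jc.2 == ' ' then cells
        else
          let vp := PySem.List.pyGetD cells jc.1 ((0:Int), (1:Int))
          PySem.List.pySetD cells jc.1 (vp.1 + pvCharInt jc.2 * vp.2, vp.2 * 10)) cells).getD j ((0:Int),(1:Int))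
      = (contribAt cells.length cs s j).foldl bStep (cells.getD j ((0:Int),(1:Int))) := by
  induction cs with
  | nil => intro s cells; simp [PySem.List.enumerate, contribAt_nil]
  | cons c cs ih =>
    intro s cells
    rw [PySem.List.enumerate_cons, List.foldl_cons]
    have hcast : (s:Int) + 1 = ((s+1 : Nat) : Int) := by push_cast; ring
    rw [hcast]
    by_cases hc : c = ' '
    · subst hc
      simp only [show ((' ' == ' ') = true) from rfl]
      rw [if_pos trivial]
      obtain ⟨ihlen, ihget⟩ := ih (s+1) cells
      refine ⟨ihlen, fun j => ?_⟩
      rw [ihget j]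
      congr 1
      by_cases hj : j = s
      · subst hj
        by_cases hw : j < cells.length
        · rw [contribAt_self _ _ _ _ hw, if_pos rfl]
          unfold contribAt; rw [if_neg (by omega)]
        · rw [contribAt_oob _ _ _ _ hw, contribAt_oob _ _ _ _ hw]
      · exact (contribAt_cons_ne _ _ _ _ _ hj).symm
    · have hbeq : (c == ' ') = false := by simp [hc]
      simp only [hbeq]
      rw [if_neg (by simp), PySem.List.pyGetD_natCast, PySem.List.pySetD_natCast]
      set cells' := cells.set s
        ((cells.getD s ((0:Int),(1:Int))).1 + pvCharInt c * (cells.getD s ((0:Int),(1:Int))).2,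
         (cells.getD s ((0:Int),(1:Int))).2 * 10) with hcells'
      obtain ⟨ihlen, ihget⟩ := ih (s+1) cells'
      have hlen' : cells'.length = cells.length := by rw [hcells', List.length_set]
      refine ⟨by rw [ihlen, hlen'], fun j => ?_⟩
      rw [ihget j, hlen']
      by_cases hj : j = s
      · subst hj
        by_cases hw : j < cells.length
        · rw [getDp_set_self hw, contribAt_self _ _ _ _ hw, if_neg hc]
          have : contribAt cells.length cs (j+1) j = [] := by
            unfold contribAt; rw [if_neg (by omega)]
          rw [this]
          simp [bStep]
        · rw [hcells', List.set_eq_of_length_le (by omega),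
              contribAt_oob _ _ _ _ hw, contribAt_oob _ _ _ _ hw]
      · rw [getDp_set_ne (Ne.symm hj), contribAt_cons_ne _ _ _ _ _ hj]

lemma bBodyFold_spec (rs : List String) : ∀ (cells : List (Int × Int)),
    ((rs.foldl (fun cells line =>
        (PySem.List.enumerate line.toList).foldl
          (fun cells (jc : Int × Char) => if jc.2 == ' ' then cells
            else
              let vp := PySem.List.pyGetD cells jc.1 ((0:Int), (1:Int))
              PySem.List.pySetD cells jc.1 (vp.1 + pvCharInt jc.2 * vp.2, vp.2 * 10)) cells) cells).length
      = cells.length)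
  ∧ ∀ j : Nat, ((rs.foldl (fun cells line =>
        (PySem.List.enumerate line.toList).foldl
          (fun cells (jc : Int × Char) => if jc.2 == ' ' then cells
            else
              let vp := PySem.List.pyGetD cells jc.1 ((0:Int), (1:Int))
              PySem.List.pySetD cells jc.1 (vp.1 + pvCharInt jc.2 * vp.2, vp.2 * 10)) cells) cells).getD j ((0:Int),(1:Int))
      = (rs.flatMap (fun line => contribAt cells.length line.toList 0 j)).foldl bStep
          (cells.getD j ((0:Int),(1:Int)))) := by
  induction rs with
  | nil => intro cells; simp
  | cons line rs ih =>
    intro cells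
    simp only [List.foldl_cons]
    have h0 : ((0:Nat):Int) = (0:Int) := rfl
    obtain ⟨hlen1, hget1⟩ := bLineFold_spec line.toList 0 cells
    rw [h0] at hlen1 hget1
    set C := (PySem.List.enumerate line.toList).foldl
      (fun cells (jc : Int × Char) => if jc.2 == ' ' then cells
        else
          let vp := PySem.List.pyGetD cells jc.1 ((0:Int), (1:Int))
          PySem.List.pySetD cells jc.1 (vp.1 + pvCharInt jc.2 * vp.2, vp.2 * 10)) cells with hC
    obtain ⟨ihlen, ihget⟩ := ih C
    refine ⟨by rw [ihlen, hlen1], fun j => ?_⟩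
    rw [ihget j, hget1 j, hlen1, List.flatMap_cons, List.foldl_append]

lemma contribAt_reverse (w : Nat) (cs : List Char) (s j : Nat) :
    (contribAt w cs s j).reverse = contribAt w cs s j := by
  rcases contribAt_sub_singleton w cs s j with h | ⟨x, h⟩ <;> rw [h] <;> simp

lemma flatMap_reverse_contrib (w : Nat) (rs : List String) (j : Nat) :
    rs.reverse.flatMap (fun line => contribAt w line.toList 0 j)
      = (rs.flatMap (fun line => contribAt w line.toList 0 j)).reverse := by
  induction rs with
  | nil => simp
  | cons line rs ih =>
    simp only [List.reverse_cons, List.flatMap_append, List.flatMap_cons,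
      List.flatMap_nil, List.append_nil, ih, List.reverse_append]
    rw [contribAt_reverse]

lemma revAccum (ds : List Int) : ∀ (v p : Int),
    ds.reverse.foldl bStep (v, p)
      = (v + (ds.foldl (fun n d => n * 10 + d) 0) * p, p * 10 ^ ds.length) := by
  induction ds with
  | nil => intro v p; simp
  | cons d t ih =>
    intro v p
    simp only [List.reverse_cons, List.foldl_append, List.foldl_cons, List.foldl_nil]
    rw [ih v p]
    simp only [bStep, List.length_cons]
    rw [horner_shift t (0*10+d)]
    simp only [Prod.mk.injEq]
    constructor <;> ring

-- B's final cells list, column by column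
lemma bcells_eq (lines : List String) :
    (lines.dropLast.reverse.foldl
      (fun cells line =>
        (PySem.List.enumerate line.toList).foldl
          (fun cells (jc : Int × Char) => if jc.2 == ' ' then cells
            else
              let vp := PySem.List.pyGetD cells jc.1 ((0:Int), (1:Int))
              PySem.List.pySetD cells jc.1 (vp.1 + pvCharInt jc.2 * vp.2, vp.2 * 10)) cells)
      (List.replicate (lines.headD "").toList.length ((0:Int), (1:Int))))
    = (List.range (lines.headD "").toList.length).map (fun j =>
        ((bDigits lines.dropLast j).foldl (fun n d => n * 10 + d) 0,
         (10:Int) ^ (bDigits lines.dropLast j).length)) := by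
  obtain ⟨hlen, hget⟩ := bBodyFold_spec lines.dropLast.reverse
      (List.replicate (lines.headD "").toList.length ((0:Int), (1:Int)))
  have hc0 : (List.replicate (lines.headD "").toList.length ((0:Int), (1:Int))).length
      = (lines.headD "").toList.length := List.length_replicate
  apply List.ext_getElem (by rw [hlen, hc0]; simp)
  intro j h1 h2
  have hjw : j < (lines.headD "").toList.length := by simpa using h2
  have hgetrepl : (List.replicate (lines.headD "").toList.length ((0:Int), (1:Int))).getD j ((0:Int),(1:Int))
      = ((0:Int),(1:Int)) := by
    rw [List.getD, List.getElem?_replicate]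
    split <;> rfl
  have hgetj : _ := hget j
  rw [hc0] at hgetj
  have hix : ∀ (l : List (Int × Int)) (h : j < l.length), l[j] = l.getD j ((0:Int),(1:Int)) := by
    intro l h
    rw [List.getD, List.getElem?_eq_getElem h]
    rfl
  rw [hix _ h1, hgetj, hgetrepl,
      flatMap_reverse_contrib,
      show (lines.dropLast.flatMap (fun line => contribAt (lines.headD "").toList.length line.toList 0 j))
          = colDigits (lines.headD "").toList.length lines.dropLast j from rfl,
      colDigits_eq_bDigits _ _ _ hjw, revAccum]
  simp only [List.getElem_map, List.getElem_range, zero_add, mul_one, one_mul]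

-- ===== grouping: A's stateful pair-fold equals B's recursive splitter =====

def encCell (vn : List Int) : Int × Int :=
  (vn.foldl (fun n d => n * 10 + d) 0, (10:Int) ^ vn.length)

lemma headD_cons_tail (gs : List (List Int)) (h : gs ≠ []) :
    gs.headD [] :: gs.tail = gs := by
  cases gs with
  | nil => exact absurd rfl h
  | cons g gs => rfl

lemma splitCols_ne_nil (cells : List (Int × Int)) : splitCols cells ≠ [] := by
  cases cells with
  | nil => simp [splitCols]
  | cons c rest =>
    obtain ⟨v, p⟩ := c
    unfold splitCols
    split <;> simp

lemma pow_ten_eq_one_iff (L : Nat) : ((10:Int) ^ L == 1) = (L == 0) := by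
  cases L with
  | zero => simp
  | succ k =>
    have h : (10:Int) ^ (k+1) ≠ 1 := by
      have : (10:Int) ^ (k+1) ≥ 10 ^ 1 := by
        apply pow_le_pow_right₀ (by norm_num) (by omega)
      omega
    simp [h]

lemma splitAgree (vns : List (List Int)) : ∀ (pv : List (List Int)) (col : List Int),
    (vns.foldl
      (fun (st : List (List Int) × List Int) vn =>
        if vn.length == 0 then (st.1 ++ [st.2], ([]:List Int))
        else (st.1, st.2 ++ [vn.foldl (fun n d => n * 10 + d) 0])) (pv, col)).1
    ++ [(vns.foldl
      (fun (st : List (List Int) × List Int) vn =>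
        if vn.length == 0 then (st.1 ++ [st.2], ([]:List Int))
        else (st.1, st.2 ++ [vn.foldl (fun n d => n * 10 + d) 0])) (pv, col)).2]
    = pv ++ (col ++ (splitCols (vns.map encCell)).headD []) :: (splitCols (vns.map encCell)).tail := by
  induction vns with
  | nil => intro pv col; simp [splitCols]
  | cons vn vns ih =>
    intro pv col
    simp only [List.foldl_cons, List.map_cons]
    rw [show splitCols (encCell vn :: vns.map encCell)
          = (if (encCell vn).2 == 1 then [] :: splitCols (vns.map encCell)
             else ((encCell vn).1 :: (splitCols (vns.map encCell)).headD [])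
                    :: (splitCols (vns.map encCell)).tail) from rfl]
    have hp : ((encCell vn).2 == 1) = (vn.length == 0) := pow_ten_eq_one_iff vn.length
    by_cases h : vn.length = 0
    · have hvn : (vn.length == 0) = true := by simp [h]
      rw [hvn] at hp
      rw [hvn, hp]
      simp only [if_true]
      rw [ih (pv ++ [col]) []]
      simp only [List.headD_cons, List.tail_cons, List.nil_append, List.append_assoc,
        List.cons_append, List.nil_append, List.append_nil]
      rw [headD_cons_tail _ (splitCols_ne_nil _)]
    · have hvn : (vn.length == 0) = false := by simp [h]
      rw [hvn] at hp
      rw [hvn, hp]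
      simp only [Bool.false_eq_true, if_false]
      rw [ih pv (col ++ [vn.foldl (fun n d => n * 10 + d) 0])]
      have hne := splitCols_ne_nil (vns.map encCell)
      cases hs : splitCols (vns.map encCell) with
      | nil => exact absurd hs hne
      | cons g gs => simp [encCell]

-- ===== vertical branch =====

lemma vert_eq (lines : List String) : parse lines true = parse_alt lines true := by
  unfold parse parse_alt
  simp only [Bool.not_true, Bool.false_eq_true, if_false, PySem.List.slice_to_neg_one]
  refine Prod.ext ?_ rfl
  have hstep : (fun (st : List (List Int) × List Int) (vn : List Int) =>
      if vn.length == 0 then (st.1 ++ [st.2], ([]:List Int))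
      else (st.1, st.2 ++ [(PySem.List.enumerate vn).foldl
        (fun acc (ic : Int × Int) => acc + ic.2 * (10:Int) ^ (vn.length - 1 - ic.1.toNat)) 0]))
    = (fun (st : List (List Int) × List Int) (vn : List Int) =>
      if vn.length == 0 then (st.1 ++ [st.2], ([]:List Int))
      else (st.1, st.2 ++ [vn.foldl (fun n d => n * 10 + d) 0])) := by
    funext st vn
    by_cases h : vn.length = 0
    · simp [h]
    · have hb : (vn.length == 0) = false := by simp [h]
      rw [hb]
      simp only [Bool.false_eq_true, if_false, nbr_eq vn]
  rw [hstep, vcols_eq lines, splitAgree, bcells_eq lines, List.map_map]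
  have hmap : ((List.range (lines.headD "").toList.length).map (fun j => bDigits lines.dropLast j)).map encCell
      = (List.range (lines.headD "").toList.length).map (fun j =>
          ((bDigits lines.dropLast j).foldl (fun n d => n * 10 + d) 0,
           (10:Int) ^ (bDigits lines.dropLast j).length)) := by
    rw [List.map_map]; rfl
  rw [← hmap, List.map_map]
  simp only [List.nil_append]
  rw [headD_cons_tail _ (splitCols_ne_nil _)]

-- ===== flat branch =====

lemma aT_eq (rows : List (List Int)) (w : Nat) :
    (PySem.List.pyRange 0 (w:Int) 1).map (fun j =>
      (PySem.List.pyRange 0 (rows.length:Int) 1).map (fun i =>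
        PySem.List.pyGetD (PySem.List.pyGetD rows i []) j 0))
    = (List.range w).map (fun j => rows.map (fun row => row.getD j 0)) := by
  have hrows : ∀ {β : Type} (g : List Int → β),
      (PySem.List.pyRange 0 (rows.length:Int) 1).map (fun i => g (PySem.List.pyGetD rows i [])) = rows.map g := by
    intro β g
    have h := PySem.List.map_pyGetD_pyRange_zero rows ([]:List Int)
    have hlen : PySem.List.len rows = (rows.length:Int) := by simp
    rw [hlen] at h
    calc (PySem.List.pyRange 0 (rows.length:Int) 1).map (fun i => g (PySem.List.pyGetD rows i []))
        = ((PySem.List.pyRange 0 (rows.length:Int) 1).map (fun i => PySem.List.pyGetD rows i [])).map g := by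
          rw [List.map_map]
          rfl
      _ = rows.map g := by rw [h]
  rw [PySem.List.pyRange_one 0 (w:Int), List.map_map]
  have hw : (((w:Int) - 0).toNat) = w := by simp
  rw [hw]
  apply List.map_congr_left
  intro k _
  simp only [Function.comp]
  rw [hrows (fun row => PySem.List.pyGetD row (0 + (k:Int)) 0)]
  apply List.map_congr_left
  intro row _
  have hc : (0 + (k:Int)) = ((k:Nat):Int) := by ring
  rw [hc, PySem.List.pyGetD_natCast]

lemma pyZipAux_eq (w : Nat) : ∀ (rows : List (List Int)),
    (∀ r ∈ rows, w ≤ r.length) →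
    pyZipAux w rows = (List.range w).map (fun j => rows.map (fun r => r.getD j 0)) := by
  induction w with
  | zero => intro rows _; simp [pyZipAux]
  | succ w ih =>
    intro rows hlen
    have hany : rows.any List.isEmpty = false := by
      rw [List.any_eq_false]
      intro r hr
      have := hlen r hr
      simp only [List.isEmpty_iff]
      intro h; rw [h] at this; simp at this
    rw [pyZipAux, hany]
    simp only [Bool.false_eq_true, if_false]
    rw [ih (rows.map List.tail) (by
      intro r hr
      obtain ⟨r₀, hr₀, rfl⟩ := List.mem_map.mp hr
      have := hlen r₀ hr₀
      cases r₀ with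
      | nil => simp at this
      | cons a t =>
        simp only [List.tail_cons]
        simp only [List.length_cons] at this
        omega)]
    rw [List.range_succ_eq_map, List.map_cons, List.map_map]
    congr 1
    · apply List.map_congr_left
      intro r _
      cases r <;> simp
    · apply List.map_congr_left
      intro k _
      simp only [Function.comp, List.map_map]
      apply List.map_congr_left
      intro r _
      cases r <;> simp

lemma nonvert_eq (lines : List String) (hpre : Pre_parse lines false) :
    parse lines false = parse_alt lines false := by
  unfold parse parse_alt
  simp only [Bool.not_false, if_true, PySem.List.slice_to_neg_one,
    PySem.List.foldl_append_singleton_eq_map, List.nil_append]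
  refine Prod.ext ?_ rfl
  obtain ⟨hlines, _, hflat⟩ := hpre
  obtain ⟨hbody, _, hmin⟩ := hflat rfl
  set rows := lines.dropLast.map
    (fun line => (PySem.Str.split₀ line).map (fun t => (PySem.Int.ofStr? t).getD 0)) with hrows
  have hrowsne : rows ≠ [] := by
    rw [hrows]
    exact fun h => hbody (List.map_eq_nil_iff.mp h)
  have hhead : (rows.headD []).length = (PySem.Str.split₀ (lines.headD "")).length := by
    cases hld : lines.dropLast with
    | nil => exact absurd hld hbody
    | cons l ls =>
      have : lines.headD "" = l := by
        cases lines with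
        | nil => exact absurd rfl hlines
        | cons a as =>
          cases as with
          | nil => simp at hld
          | cons b bs =>
            have : (a :: b :: bs).dropLast = a :: (b :: bs).dropLast := rfl
            rw [this] at hld
            exact (List.cons_eq_cons.mp hld).1
      rw [hrows, hld, this]
      simp
  have hall : ∀ r ∈ rows, (rows.headD []).length ≤ r.length := by
    intro r hr
    rw [hrows] at hr
    obtain ⟨line, hline, rfl⟩ := List.mem_map.mp hr
    rw [hhead]
    simpa using hmin line hline
  rw [aT_eq, pyZip, if_neg (by simpa using hrowsne), pyZipAux_eq _ rows hall]

-- ===== VERDICT (by name: the statement is the Claim_ definition above) =====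
theorem parse_spec : Claim_equal_parse := by
  intro lines vertical _ hpre
  unfold Spec_parse
  cases vertical
  · exact nonvert_eq lines hpre
  · exact vert_eq lines
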